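-- pv_equiv track=rewrite | github.com/PFCrtx/old_junk | other/sea_battle.py | final_test
-- ===== SOURCE A (Python) =====
-- def final_test(arr):
--     test = []
--     sn = 0
--     st = 0
--     for elem in arr:
--         test.append(elem)
--     t = sorted(test)
--     try:
--         for i in t:
--             if t[(t.index(i))+1] - i == 1:
--                 sn +=0
--             else:
--                 sn += 1
--     except IndexError:
--         pass
--     try:
--         for i in t:
--             if t[(t.index(i))+1] - i == 10:
--                 st +=0
--             else:
--                 st += 1
--     except IndexError:
--         pass
--     if sn > 0 and st > 0:
--         return False
--     else:
--         return True
-- ===== SOURCE B (Python) =====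
-- def final_test(arr):
--     n = len(arr)
--     if n < 2:
--         return True
--     s = set(arr)
--     if len(s) != n:
--         return False
--     m = min(arr)
--     return s == set(range(m, m + n)) or s == set(range(m, m + 10 * n, 10))
-- ===== Notes on version B (the rewrite author's own statement) =====
-- stated objective: faster
-- what changed: B never sorts and keeps no pairwise/diff scan at all: after an O(n) duplicate check via len(set(arr)) it compares set(arr) against the two explicitly generated ship templates set(range(m, m+n)) and set(range(m, m+10n, 10)) anchored at m = min(arr), replacing A's O(n^2) sort-plus-repeated-.index loops.
import Mathlib
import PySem

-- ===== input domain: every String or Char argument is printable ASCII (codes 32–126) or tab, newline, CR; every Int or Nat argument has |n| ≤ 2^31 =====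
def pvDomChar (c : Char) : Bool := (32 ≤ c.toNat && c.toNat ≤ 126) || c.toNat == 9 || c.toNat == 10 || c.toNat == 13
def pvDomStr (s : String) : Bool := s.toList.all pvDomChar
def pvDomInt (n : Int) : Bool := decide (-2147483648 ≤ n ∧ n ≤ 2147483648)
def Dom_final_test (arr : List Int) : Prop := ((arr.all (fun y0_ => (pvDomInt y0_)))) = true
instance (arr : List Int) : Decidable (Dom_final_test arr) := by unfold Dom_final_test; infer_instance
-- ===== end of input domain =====

-- B drops A's sort and its two exception-terminated index-lookup loops entirely: it compares
-- set(arr) against the two explicitly generated ship templates (the row and the column starting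
-- at min(arr)) after an O(n) duplicate check.

-- ===== PORT A =====
-- each try-for loop of A: walks the occurrences of t, looks up the FIRST index of the
-- current value, checks t[index+1] - i == d; IndexError (pyGet? = none) ends the loop.
def countLoopA (t : List Int) (d : Int) : List Int → Int → Int
  | [], sn => sn
  | i :: rest, sn =>
    match PySem.List.index? t i with
    | none => sn                     -- unreachable: i ∈ t
    | some j =>
      match PySem.List.pyGet? t ((j : Int) + 1) with
      | none => sn                   -- IndexError: 'except IndexError: pass'
      | some v => countLoopA t d rest (if v - i == d then sn else sn + 1)

def final_test (arr : List Int) : Bool :=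
  let test := arr.foldl (fun acc e => acc ++ [e]) []
  let t := PySem.List.sorted test (fun x => x) false
  let sn := countLoopA t 1 t 0
  let st := countLoopA t 10 t 0
  if sn > 0 ∧ st > 0 then false else true

-- ===== PORT B =====
def final_test_alt (arr : List Int) : Bool :=
  let n := arr.length
  if n < 2 then true
  else
    let s := PySem.Set.ofList arr
    if PySem.Set.len s ≠ (n : Int) then false
    else
      match PySem.List.min? arr (fun x => x) with   -- min(arr); arr ≠ [] here, so some
      | none => true                                -- unreachable
      | some m =>
        PySem.Set.equal s (PySem.Set.ofList (PySem.List.pyRange m (m + (n : Int)) 1)) ||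
        PySem.Set.equal s (PySem.Set.ofList (PySem.List.pyRange m (m + 10 * (n : Int)) 10))

-- ===== PRECONDITION & SPEC =====
def Spec_final_test (arr : List Int) (out : Bool) : Prop := out = final_test_alt arr
instance (arr : List Int) (out : Bool) : Decidable (Spec_final_test arr out) := by unfold Spec_final_test; infer_instance

-- ===== CLAIM (what is proved, stated in full; the proofs are below) =====
def Claim_equal_final_test : Prop := ∀ (arr : List Int), Dom_final_test arr → Spec_final_test arr (final_test arr)

-- ===== LEMMAS AND PROOFS =====

-- adjacent-difference chain: all consecutive differences equal d
def chainD (d : Int) : List Int → Bool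
  | [] => true
  | [_] => true
  | a :: b :: r => (b - a == d) && chainD d (b :: r)

-- local (position-free) version of A's loop, valid when t has no duplicates
def localLoop (d : Int) : List Int → Int → Int
  | [], sn => sn
  | [_], sn => sn
  | a :: b :: r, sn => localLoop d (b :: r) (if b - a == d then sn else sn + 1)

lemma localLoop_add (d : Int) : ∀ (s : List Int) (c sn : Int),
    localLoop d s (c + sn) = c + localLoop d s sn := by
  intro s
  induction s with
  | nil => intro c sn; simp [localLoop]
  | cons a r ih =>
    intro c sn
    cases r with
    | nil => simp [localLoop]
    | cons b r' =>
      simp only [localLoop]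
      split_ifs with h
      · exact ih c sn
      · rw [show c + sn + 1 = c + (sn + 1) by ring]
        exact ih c (sn + 1)

lemma localLoop_nonneg (d : Int) : ∀ (s : List Int), 0 ≤ localLoop d s 0 := by
  intro s
  induction s with
  | nil => simp [localLoop]
  | cons a r ih =>
    cases r with
    | nil => simp [localLoop]
    | cons b r' =>
      simp only [localLoop]
      split_ifs with h
      · exact ih
      · simp only [zero_add]
        have h1 : localLoop d (b :: r') 1 = 1 + localLoop d (b :: r') 0 := by
          simpa using localLoop_add d (b :: r') 1 0
        omega

lemma localLoop_eq_zero_iff_chainD (d : Int) : ∀ (s : List Int),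
    (localLoop d s 0 = 0) ↔ chainD d s = true := by
  intro s
  induction s with
  | nil => simp [localLoop, chainD]
  | cons a r ih =>
    cases r with
    | nil => simp [localLoop, chainD]
    | cons b r' =>
      simp only [localLoop, chainD, Bool.and_eq_true]
      split_ifs with h
      · simp [ih, h]
      · simp only [zero_add]
        have h1 : localLoop d (b :: r') 1 = 1 + localLoop d (b :: r') 0 := by
          simpa using localLoop_add d (b :: r') 1 0
        have h2 := localLoop_nonneg d (b :: r')
        constructor
        · intro hz; omega
        · rintro ⟨hh, -⟩; exact absurd hh h

-- element after position pre.length in pre ++ i :: rest is rest's head (or IndexError)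
lemma pyGet?_succ_prefix (t pre rest : List Int) (i : Int) (ht : t = pre ++ i :: rest) :
    PySem.List.pyGet? t ((pre.length : Int) + 1) = rest.head? := by
  have hc : ((pre.length : Int) + 1) = ((pre.length + 1 : Nat) : Int) := by push_cast; ring
  rw [hc, PySem.List.pyGet?_natCast, ht]
  rw [List.getElem?_append_right (by omega)]
  cases rest <;> simp

-- first index and successor element for the head of a suffix of a duplicate-free list
lemma index_step_of_nodup (t pre rest : List Int) (i : Int)
    (hnd : t.Nodup) (ht : t = pre ++ i :: rest) :
    PySem.List.index? t i = some pre.length ∧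
    PySem.List.pyGet? t ((pre.length : Int) + 1) = rest.head? := by
  have hmem : i ∉ pre := by
    subst ht
    rw [List.nodup_append] at hnd
    intro hc
    exact hnd.2.2 i hc i (List.mem_cons_self ..) rfl
  constructor
  · rw [PySem.List.index?_eq_some_iff]
    exact ⟨pre, rest, ht, rfl, hmem⟩
  · exact pyGet?_succ_prefix t pre rest i ht

-- on a duplicate-free list, A's loop over a suffix equals the local loop
lemma countLoopA_eq_localLoop (t : List Int) (d : Int) (hnd : t.Nodup) :
    ∀ (s pre : List Int), t = pre ++ s → ∀ sn, countLoopA t d s sn = localLoop d s sn := by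
  intro s
  induction s with
  | nil => intro pre h sn; rfl
  | cons i rest ih =>
    intro pre h sn
    obtain ⟨h1, h2⟩ := index_step_of_nodup t pre rest i hnd h
    simp only [countLoopA, h1, h2]
    cases rest with
    | nil => simp [localLoop]
    | cons b r' =>
      simp only [List.head?, localLoop]
      exact ih (pre ++ [i]) (by simp [h]) _

-- a sorted list with a repetition contains two adjacent equal elements, the first
-- occurrence of that value not appearing earlier
lemma sorted_not_nodup_adj (t : List Int) (hs : t.Pairwise (· ≤ ·)) (hnd : ¬ t.Nodup) :
    ∃ pre a rest, t = pre ++ a :: a :: rest ∧ a ∉ pre := by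
  induction t with
  | nil => exact absurd List.nodup_nil hnd
  | cons x xs ih =>
    by_cases hx : x ∈ xs
    · cases xs with
      | nil => simp at hx
      | cons y ys =>
        have hxy : x ≤ y := (List.pairwise_cons.mp hs).1 y (by simp)
        have hyx : y ≤ x := by
          have hp := (List.pairwise_cons.mp hs).2
          rcases (List.mem_cons.mp hx) with h | h
          · omega
          · have := (List.pairwise_cons.mp hp).1 x h; omega
        have : y = x := le_antisymm hyx hxy
        exact ⟨[], x, ys, by simp [this], by simp⟩
    · have hxs : ¬ xs.Nodup := by
        intro hc; exact hnd (List.nodup_cons.mpr ⟨hx, hc⟩)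
      obtain ⟨pre, a, rest, heq, hm⟩ := ih (List.pairwise_cons.mp hs).2 hxs
      refine ⟨x :: pre, a, rest, by simp [heq], ?_⟩
      intro hc
      rcases List.mem_cons.mp hc with h | h
      · exact hx (by rw [heq, h]; simp)
      · exact hm h

lemma countLoopA_mono (t : List Int) (d : Int) :
    ∀ (s : List Int) (sn : Int), sn ≤ countLoopA t d s sn := by
  intro s
  induction s with
  | nil => intro sn; simp [countLoopA]
  | cons i rest ih =>
    intro sn
    simp only [countLoopA]
    cases h1 : PySem.List.index? t i with
    | none => simp
    | some j =>
      dsimp only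
      cases h2 : PySem.List.pyGet? t ((j : Int) + 1) with
      | none => simp
      | some v =>
        dsimp only
        have := ih (if v - i == d then sn else sn + 1)
        split_ifs at this ⊢ <;> omega

-- if the first index of x in pre++suf lies inside pre, it is strictly below pre.length
lemma index_lt_of_mem_prefix (pre suf : List Int) (x : Int) (hx : x ∈ pre) :
    ∃ k, PySem.List.index? (pre ++ suf) x = some k ∧ k < pre.length := by
  rw [PySem.List.index?_append_of_mem suf hx]
  cases hk : PySem.List.index? pre x with
  | none => exact absurd ((PySem.List.index?_eq_none_iff _ _).mp hk) (not_not_intro hx)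
  | some k =>
    obtain ⟨hlt, -, -⟩ := PySem.List.getElem_of_index?_eq_some hk
    exact ⟨k, rfl, hlt⟩

-- running A's loop over a prefix whose elements all have a successor never raises,
-- and only grows the accumulator
lemma countLoopA_prefix (t : List Int) (d : Int) :
    ∀ (p : List Int), (∀ x ∈ p, ∃ k, PySem.List.index? t x = some k ∧ k + 1 < t.length) →
      ∀ (s : List Int),
      ∀ sn, ∃ sn', sn ≤ sn' ∧ countLoopA t d (p ++ s) sn = countLoopA t d s sn' := by
  intro p
  induction p with
  | nil => intro _ s sn; exact ⟨sn, le_refl _, rfl⟩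
  | cons x p' ih =>
    intro hin s sn
    obtain ⟨k0, hk0, hklt⟩ := hin x (by simp)
    simp only [List.cons_append, countLoopA]
    cases h1 : PySem.List.index? t x with
    | none => rw [h1] at hk0; exact absurd hk0 (by simp)
    | some k =>
      dsimp only
      have hk : k + 1 < t.length := by rw [h1] at hk0; injection hk0 with he; omega
      cases h2 : PySem.List.pyGet? t ((k : Int) + 1) with
      | none =>
        exfalso
        have hc : ((k : Int) + 1) = ((k + 1 : Nat) : Int) := by push_cast; ring
        rw [hc, PySem.List.pyGet?_natCast] at h2
        rw [List.getElem?_eq_none_iff] at h2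
        omega
      | some v =>
        dsimp only
        obtain ⟨sn', hle, heq⟩ := ih (fun y hy => hin y (by simp [hy])) s
          (if v - x == d then sn else sn + 1)
        refine ⟨sn', ?_, heq⟩
        split_ifs at hle <;> omega

lemma chainD_tail (d a : Int) (l : List Int) (h : chainD d (a :: l) = true) :
    chainD d l = true := by
  cases l with
  | nil => simp [chainD]
  | cons b r => simp only [chainD, Bool.and_eq_true] at h; exact h.2

lemma chainD_dup_false (d : Int) (hd : d ≠ 0) :
    ∀ (p : List Int) (a : Int) (r : List Int), chainD d (p ++ a :: a :: r) = false := by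
  intro p
  induction p with
  | nil =>
    intro a r
    simp only [List.nil_append, chainD, Bool.and_eq_false_iff]
    left
    simp [sub_self]
    omega
  | cons x p' ih =>
    intro a r
    by_contra hc
    have h : chainD d (x :: (p' ++ a :: a :: r)) = true := by
      simpa using Bool.not_eq_false _ |>.mp (by simpa using hc)
    have := chainD_tail d x _ h
    rw [ih a r] at this
    exact absurd this (by simp)

-- the main characterisation of A's counting loop on a sorted list
lemma countLoopA_pos_iff (t : List Int) (d : Int) (hd : 0 < d)
    (hs : t.Pairwise (· ≤ ·)) :
    (countLoopA t d t 0 = 0) ↔ chainD d t = true := by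
  by_cases hnd : t.Nodup
  · rw [countLoopA_eq_localLoop t d hnd t [] (by simp) 0]
    exact localLoop_eq_zero_iff_chainD d t
  · obtain ⟨pre, a, rest, heq, hm⟩ := sorted_not_nodup_adj t hs hnd
    have hfalse : chainD d t = false := by
      rw [heq]; exact chainD_dup_false d (by omega) pre a rest
    have hlen : t.length = pre.length + (rest.length + 2) := by rw [heq]; simp
    have hin : ∀ x ∈ pre, ∃ k, PySem.List.index? t x = some k ∧ k + 1 < t.length := by
      intro x hx
      obtain ⟨k, hk, hkl⟩ := index_lt_of_mem_prefix pre (a :: a :: rest) x hx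
      exact ⟨k, by rw [heq]; exact hk, by omega⟩
    obtain ⟨sn', hle, hrun⟩ := countLoopA_prefix t d pre hin (a :: a :: rest) 0
    have hidx : PySem.List.index? t a = some pre.length := by
      rw [PySem.List.index?_eq_some_iff]
      exact ⟨pre, a :: rest, heq, rfl, hm⟩
    have hget : PySem.List.pyGet? t ((pre.length : Int) + 1) = some a :=
      pyGet?_succ_prefix t pre (a :: rest) a heq
    have hstep : countLoopA t d (a :: a :: rest) sn' =
        countLoopA t d (a :: rest) (sn' + 1) := by
      simp only [countLoopA, hidx, hget]
      have h0 : ¬(0 = d) := by omega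
      simp [h0]
    have hmono := countLoopA_mono t d (a :: rest) (sn' + 1)
    have hgoal : countLoopA t d t 0 = countLoopA t d (a :: rest) (sn' + 1) := by
      calc countLoopA t d t 0
          = countLoopA t d (pre ++ (a :: a :: rest)) 0 :=
            congrArg (fun l => countLoopA t d l 0) heq
        _ = countLoopA t d (a :: a :: rest) sn' := hrun
        _ = countLoopA t d (a :: rest) (sn' + 1) := hstep
    have hpos : countLoopA t d t 0 ≠ 0 := by omega
    simp [hfalse, hpos]

-- A's value, in closed form: both chain predicates on the sorted input
lemma final_test_eq_chains (arr : List Int) :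
    final_test arr =
      (chainD 1 (PySem.List.sorted arr (fun x => x) false) ||
       chainD 10 (PySem.List.sorted arr (fun x => x) false)) := by
  unfold final_test
  have htest : arr.foldl (fun acc e => acc ++ [e]) [] = arr := by
    simpa using PySem.List.foldl_append_singleton arr []
  rw [htest]
  set t := PySem.List.sorted arr (fun x => x) false with hT
  have hs : t.Pairwise (· ≤ ·) := PySem.List.sorted_pairwise arr (fun x => x)
  have h1 := countLoopA_pos_iff t 1 (by norm_num) hs
  have h10 := countLoopA_pos_iff t 10 (by norm_num) hs
  have hn1 := countLoopA_mono t 1 t 0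
  have hn10 := countLoopA_mono t 10 t 0
  show (if countLoopA t 1 t 0 > 0 ∧ countLoopA t 10 t 0 > 0 then false else true)
      = (chainD 1 t || chainD 10 t)
  split_ifs with hc
  · rcases hc with ⟨hp1, hp10⟩
    have hf1 : chainD 1 t = false := by
      rcases Bool.eq_false_or_eq_true (chainD 1 t) with h | h
      · exact absurd (h1.mpr h) (by omega)
      · exact h
    have hf10 : chainD 10 t = false := by
      rcases Bool.eq_false_or_eq_true (chainD 10 t) with h | h
      · exact absurd (h10.mpr h) (by omega)
      · exact h
    simp [hf1, hf10]
  · rcases not_and_or.mp hc with h | h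
    · have hz : countLoopA t 1 t 0 = 0 := by omega
      simp [h1.mp hz]
    · have hz : countLoopA t 10 t 0 = 0 := by omega
      simp [h10.mp hz]

-- ===== B-side lemmas: the arithmetic-progression template =====

def apL (m d : Int) (n : Nat) : List Int := (List.range n).map (fun k : Nat => m + d * (k : Int))

lemma apL_succ (m d : Int) (n : Nat) : apL m d (n + 1) = m :: apL (m + d) d n := by
  unfold apL
  rw [List.range_succ_eq_map, List.map_cons, List.map_map]
  congr 1
  · simp
  · apply List.map_congr_left
    intro k _
    simp only [Function.comp, Nat.succ_eq_add_one]
    push_cast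
    ring

-- a chain starting at a IS the arithmetic progression from a
lemma chainD_cons_eq_apL (d : Int) : ∀ (l : List Int) (a : Int),
    chainD d (a :: l) = true → a :: l = apL a d (l.length + 1) := by
  intro l
  induction l with
  | nil => intro a _; simp [apL]
  | cons b r ih =>
    intro a h
    simp only [chainD, Bool.and_eq_true, beq_iff_eq] at h
    obtain ⟨hb, hch⟩ := h
    have htail := ih b hch
    simp only [List.length_cons]
    rw [apL_succ, List.cons.injEq]
    exact ⟨rfl, by rw [htail, show a + d = b by omega]⟩

-- the arithmetic progression satisfies the chain predicate
lemma chainD_apL (d m : Int) (n : Nat) : chainD d (apL m d n) = true := by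
  induction n generalizing m with
  | zero => simp [apL, chainD]
  | succ k ih =>
    rw [apL_succ]
    cases k with
    | zero => simp [apL, chainD]
    | succ j =>
      rw [apL_succ]
      have htl := ih (m + d)
      rw [apL_succ] at htl
      simp only [chainD] at htl ⊢
      rw [htl]
      simp

lemma apL_pairwise_lt (m d : Int) (n : Nat) (hd : 0 < d) :
    (apL m d n).Pairwise (· < ·) := by
  unfold apL
  rw [List.pairwise_map]
  apply List.Pairwise.imp _ (List.pairwise_lt_range)
  intro i j hij
  have : d * (i : Int) < d * (j : Int) := by
    apply mul_lt_mul_of_pos_left _ hd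
    exact_mod_cast hij
  omega

lemma apL_nodup (m d : Int) (n : Nat) (hd : 0 < d) : (apL m d n).Nodup :=
  (apL_pairwise_lt m d n hd).imp (fun h => ne_of_lt h)

-- pyRange with positive step d and count divisible out is exactly the progression
lemma pyRange_eq_apL (m d : Int) (n : Nat) (hd : 0 < d) (hn : 0 < n)
    (hcount : ((d * (n : Int) + d - 1) / d).toNat = n) :
    PySem.List.pyRange m (m + d * (n : Int)) d = apL m d n := by
  rw [PySem.List.pyRange_of_pos m (m + d * (n : Int)) hd]
  have hlt : m < m + d * (n : Int) := by nlinarith [Int.natCast_pos.mpr hn]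
  rw [if_pos hlt]
  have harg : ((m + d * (n : Int) - m + d - 1) / d).toNat = n := by
    rw [show m + d * (n : Int) - m = d * (n : Int) by ring]
    exact hcount
  rw [harg]
  rfl

-- ofList arr is a sublist of arr (set(xs) keeps first occurrences)
lemma ofList_sublist (arr : List Int) : (PySem.Set.ofList arr).Sublist arr := by
  induction arr with
  | nil => simp [PySem.Set.ofList_nil]
  | cons x xs ih =>
    rw [PySem.Set.ofList_cons]
    refine List.Sublist.cons₂ x ?_
    exact List.Sublist.trans (by unfold PySem.Set.discard; exact List.filter_sublist) ih

-- len(set(arr)) == len(arr) exactly when arr has no duplicates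
lemma len_ofList_eq_iff (arr : List Int) :
    (PySem.Set.ofList arr).length = arr.length ↔ arr.Nodup := by
  constructor
  · intro h
    have := (ofList_sublist arr).eq_of_length h
    rw [← this]
    exact PySem.Set.nodup_ofList arr
  · intro h
    rw [PySem.Set.ofList_eq_self_of_nodup arr h]

-- the head of the sorted list is the value min(arr) returns
lemma head_sorted_eq_min (arr : List Int) (a : Int) (l : List Int) (m : Int)
    (hs : PySem.List.sorted arr (fun x => x) false = a :: l)
    (hm : PySem.List.min? arr (fun x => x) = some m) : a = m := by
  have ha_mem : a ∈ arr := by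
    rw [← PySem.List.mem_sorted arr (fun x => x) false a, hs]
    simp
  have hm_mem : m ∈ arr := PySem.List.min?_mem hm
  have h1 : m ≤ a := PySem.List.min?_isMin hm a ha_mem
  have h2 : a ≤ m := PySem.List.key_head_sorted_le arr (fun x => x) hs m hm_mem
  omega

-- for nodup arr of length ≥ 2: set equality with the template decides the chain property
lemma equal_template_iff_chainD (arr : List Int) (d m : Int) (hd : 0 < d)
    (hnd : arr.Nodup) (h2 : 2 ≤ arr.length)
    (hm : PySem.List.min? arr (fun x => x) = some m) :
    PySem.Set.equal arr (apL m d arr.length) = chainD d (PySem.List.sorted arr (fun x => x) false) := by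
  set t := PySem.List.sorted arr (fun x => x) false with hT
  have hperm : t.Perm arr := PySem.List.sorted_perm arr (fun x => x) false
  have hlen : t.length = arr.length := hperm.length_eq
  obtain ⟨a, l, hcons⟩ : ∃ a l, t = a :: l := by
    cases ht : t with
    | nil => rw [ht] at hlen; simp at hlen; omega
    | cons a l => exact ⟨a, l, rfl⟩
  have ham : a = m := head_sorted_eq_min arr a l m (hT ▸ hcons) hm
  have hlen' : l.length + 1 = arr.length := by rw [← hlen, hcons]; simp
  cases hch : chainD d t with
  | true =>
    -- chain true: t IS the progression, so members coincide
    have hform := chainD_cons_eq_apL d l a (hcons ▸ hch)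
    have hteq : t = apL m d arr.length := by
      rw [hcons, hform, ham, hlen']
    apply (PySem.Set.equal_iff arr (apL m d arr.length)).mpr
    intro x
    rw [← hteq]
    exact Iff.symm (hperm.mem_iff)
  | false =>
    -- chain false: the sets must differ (same members would force t = apL, a chain)
    by_contra hne
    have heq : PySem.Set.equal arr (apL m d arr.length) = true := Bool.ne_false_iff.mp hne
    have hmem : ∀ x, x ∈ arr ↔ x ∈ apL m d arr.length :=
      (PySem.Set.equal_iff arr (apL m d arr.length)).mp heq
    have hperm2 : (apL m d arr.length).Perm arr := by
      apply (List.perm_ext_iff_of_nodup (apL_nodup m d arr.length hd) hnd).mpr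
      intro x; exact (hmem x).symm
    have hsorted : t = apL m d arr.length := by
      rw [hT]
      exact PySem.List.sorted_eq_of_perm_of_pairwise_lt arr (apL m d arr.length) (fun x => x)
        hperm2 (by simpa using apL_pairwise_lt m d arr.length hd)
    have : chainD d t = true := by rw [hsorted]; exact chainD_apL d m arr.length
    rw [this] at hch; exact absurd hch (by simp)

theorem final_test_spec_aux (arr : List Int) :
    final_test arr = final_test_alt arr := by
  rw [final_test_eq_chains]
  unfold final_test_alt
  set t := PySem.List.sorted arr (fun x => x) false with hT
  by_cases hsmall : arr.length < 2
  · rw [if_pos hsmall]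
    have hlen : t.length = arr.length := (PySem.List.sorted_perm arr (fun x => x) false).length_eq
    have : chainD 1 t = true := by
      cases ht : t with
      | nil => simp [chainD]
      | cons a l =>
        cases l with
        | nil => simp [chainD]
        | cons b r => rw [ht] at hlen; simp at hlen; omega
    simp [this]
  · rw [if_neg hsmall]
    replace hsmall : 2 ≤ arr.length := by omega
    by_cases hnd : arr.Nodup
    · -- duplicate-free: guard passes, set comparisons decide the chains
      have hset : PySem.Set.ofList arr = arr := PySem.Set.ofList_eq_self_of_nodup arr hnd
      have hlen : ¬ (PySem.Set.len (PySem.Set.ofList arr) ≠ (arr.length : Int)) := by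
        rw [hset]; unfold PySem.Set.len; simp
      rw [if_neg hlen]
      obtain ⟨m, hm⟩ : ∃ m, PySem.List.min? arr (fun x => x) = some m := by
        cases h : PySem.List.min? arr (fun x => x) with
        | none =>
          have := (PySem.List.min?_eq_none_iff arr (fun x => x)).mp h
          rw [this] at hsmall; simp at hsmall
        | some m => exact ⟨m, rfl⟩
      rw [hm]
      dsimp only
      have hr1 : PySem.List.pyRange m (m + (arr.length : Int)) 1 = apL m 1 arr.length := by
        have := pyRange_eq_apL m 1 arr.length (by norm_num) (by omega) (by omega)
        simpa using this
      have hr10 : PySem.List.pyRange m (m + 10 * (arr.length : Int)) 10 = apL m 10 arr.length := by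
        exact pyRange_eq_apL m 10 arr.length (by norm_num) (by omega) (by omega)
      rw [hset, hr1, hr10,
        PySem.Set.ofList_eq_self_of_nodup _ (apL_nodup m 1 arr.length (by norm_num)),
        PySem.Set.ofList_eq_self_of_nodup _ (apL_nodup m 10 arr.length (by norm_num)),
        equal_template_iff_chainD arr 1 m (by norm_num) hnd hsmall hm,
        equal_template_iff_chainD arr 10 m (by norm_num) hnd hsmall hm]
    · -- duplicates: B fails the length guard; A's chains are both false
      have hlt : (PySem.Set.ofList arr).length ≠ arr.length := by
        intro h; exact hnd ((len_ofList_eq_iff arr).mp h)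
      have hguard : (PySem.Set.len (PySem.Set.ofList arr) ≠ (arr.length : Int)) := by
        unfold PySem.Set.len
        intro h; apply hlt; exact_mod_cast h
      rw [if_pos hguard]
      have hs : t.Pairwise (· ≤ ·) := PySem.List.sorted_pairwise arr (fun x => x)
      have hndt : ¬ t.Nodup := by
        intro h
        exact hnd (((PySem.List.sorted_perm arr (fun x => x) false).nodup_iff).mp h)
      obtain ⟨pre, a, rest, heq, -⟩ := sorted_not_nodup_adj t hs hndt
      have hf1 : chainD 1 t = false := by rw [heq]; exact chainD_dup_false 1 (by norm_num) pre a rest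
      have hf10 : chainD 10 t = false := by rw [heq]; exact chainD_dup_false 10 (by norm_num) pre a rest
      simp [hf1, hf10]

-- ===== VERDICT (by name: the statement is the Claim_ definition above) =====
theorem final_test_spec : Claim_equal_final_test := by
  intro arr _
  unfold Spec_final_test
  exact final_test_spec_aux arr
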